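-- pv_equiv track=rewrite | github.com/arrysoni/Calculator | HW1.py | has_hoagie
-- ===== SOURCE A (Python) =====
-- def has_hoagie(num):
--     """
--         >>> has_hoagie(737)
--         True
--         >>> has_hoagie(35)
--         False
--         >>> has_hoagie(-6060)
--         True
--         >>> has_hoagie(-111)
--         True
--         >>> has_hoagie(6945)
--         False
--     """
--     #- YOUR CODE STARTS HERE
--
--     if num<0:
--         num=num*(-1)                                        # Converts the number to a positive if it is negative
--
--
--     if num<=100:                                            # The number shouldn't be a two or one digit number
--         return False
--     else:
--
--         while (num>=100):
--             rem=num%10                                      # Gets the remainder of the number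
--             sig_dig=(num//100)%10                           # Significant digits stored
--             if rem==sig_dig:
--                 return True
--             else:
--                 num=num//10
--     return False
-- ===== SOURCE B (Python) =====
-- def has_hoagie(num):
--     n = abs(num)
--     ds = []
--     while n > 0:
--         ds.append(n % 10)
--         n //= 10
--     return any(a == b for a, b in zip(ds, ds[2:]))
-- ===== Notes on version B (the rewrite author's own statement) =====
-- stated objective: alternative
-- what changed: B materialises the digit list of |num| once (least-significant first) and then decides the answer with a single any over zip(ds, ds[2:]), replacing A's shift-and-compare while loop with its small-number guard and in-loop significant-digit extraction.
import Mathlib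
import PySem

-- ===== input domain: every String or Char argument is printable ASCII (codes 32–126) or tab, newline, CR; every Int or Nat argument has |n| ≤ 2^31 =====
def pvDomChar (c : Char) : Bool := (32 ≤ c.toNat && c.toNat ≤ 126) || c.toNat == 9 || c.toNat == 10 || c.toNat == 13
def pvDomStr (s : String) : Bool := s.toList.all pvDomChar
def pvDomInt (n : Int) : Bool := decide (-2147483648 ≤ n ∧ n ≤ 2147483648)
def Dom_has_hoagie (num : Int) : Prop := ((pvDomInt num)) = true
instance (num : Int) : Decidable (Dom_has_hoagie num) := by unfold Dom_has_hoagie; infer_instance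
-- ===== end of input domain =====

-- B builds the digit list once and scans pairs two apart with any/zip, instead of A's
-- shift-and-compare while loop; same cost, alternative decomposition.

-- ===== PORT A =====
-- the 'while (num>=100)' loop of A, step for step (early return on rem == sig_dig)
def hoagieLoop (num : Int) : Bool :=
  if _h : num ≥ 100 then
    let rem := PySem.Int.mod num 10
    let sig_dig := PySem.Int.mod (PySem.Int.floordiv num 100) 10
    if rem = sig_dig then true
    else hoagieLoop (PySem.Int.floordiv num 10)
  else false
termination_by num.toNat
decreasing_by
  simp only [PySem.Int.floordiv, Int.fdiv_eq_ediv]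
  omega

def has_hoagie (num : Int) : Bool :=
  let num := if num < 0 then num * (-1) else num
  if num ≤ 100 then false
  else hoagieLoop num

-- ===== PORT B =====
-- the 'while n > 0: ds.append(n % 10); n //= 10' loop of B: digits, least significant first
def pyDigits (n : Int) : List Int :=
  if _h : n > 0 then PySem.Int.mod n 10 :: pyDigits (PySem.Int.floordiv n 10)
  else []
termination_by n.toNat
decreasing_by
  simp only [PySem.Int.floordiv, Int.fdiv_eq_ediv]
  omega

-- ds[2:] on a list (nonnegative literal bound) is List.drop 2; zip/any as in Source B
def has_hoagie_alt (num : Int) : Bool :=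
  let ds := pyDigits |num|
  (List.zip ds (ds.drop 2)).any (fun p => p.1 == p.2)

-- ===== PRECONDITION & SPEC =====
def Spec_has_hoagie (num : Int) (out : Bool) : Prop := out = has_hoagie_alt num
instance (num : Int) (out : Bool) : Decidable (Spec_has_hoagie num out) := by unfold Spec_has_hoagie; infer_instance

-- ===== CLAIM (what is proved, stated in full; the proofs are below) =====
def Claim_equal_has_hoagie : Prop := ∀ (num : Int), Dom_has_hoagie num → Spec_has_hoagie num (has_hoagie num)

-- ===== LEMMAS AND PROOFS =====

theorem fd10 (a : Int) : PySem.Int.floordiv a 10 = a / 10 := by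
  simp [PySem.Int.floordiv, Int.fdiv_eq_ediv]

theorem fd100 (a : Int) : PySem.Int.floordiv a 100 = a / 100 := by
  simp [PySem.Int.floordiv, Int.fdiv_eq_ediv]

theorem md10 (a : Int) : PySem.Int.mod a 10 = a % 10 := by
  simp [PySem.Int.mod, Int.fmod_eq_emod]

theorem pyDigits_pos (n : Int) (h : 0 < n) :
    pyDigits n = n % 10 :: pyDigits (n / 10) := by
  rw [pyDigits, dif_pos h, fd10, md10]

theorem pyDigits_nonpos (n : Int) (h : ¬ 0 < n) : pyDigits n = [] := by
  rw [pyDigits, dif_neg h]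

theorem pyDigits_len_le_two (n : Int) (h0 : 0 ≤ n) (h : n < 100) :
    (pyDigits n).length ≤ 2 := by
  by_cases h1 : 0 < n
  · rw [pyDigits_pos n h1]
    by_cases h2 : 0 < n / 10
    · rw [pyDigits_pos _ h2]
      have h3 : ¬ 0 < n / 10 / 10 := by omega
      rw [pyDigits_nonpos _ h3]
      simp
    · rw [pyDigits_nonpos _ h2]; simp
  · rw [pyDigits_nonpos _ h1]; simp

theorem hoagieLoop_ge (n : Int) (h : n ≥ 100) :
    hoagieLoop n
      = if n % 10 = n / 100 % 10 then true else hoagieLoop (n / 10) := by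
  rw [hoagieLoop, dif_pos h]
  simp only [md10, fd10, fd100]

theorem hoagieLoop_lt (n : Int) (h : ¬ n ≥ 100) : hoagieLoop n = false := by
  rw [hoagieLoop, dif_neg h]

theorem hoagieLoop_eq_any (n : Int) (h : 0 ≤ n) :
    hoagieLoop n
      = (List.zip (pyDigits n) ((pyDigits n).drop 2)).any (fun p => p.1 == p.2) := by
  suffices H : ∀ k : Nat, ∀ n : Int, 0 ≤ n → n.toNat = k →
      hoagieLoop n
        = (List.zip (pyDigits n) ((pyDigits n).drop 2)).any (fun p => p.1 == p.2) by
    exact H n.toNat n h rfl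
  intro k
  induction k using Nat.strong_induction_on with
  | _ k IH =>
    intro n h0 hk
    by_cases hge : n ≥ 100
    · have e1 : pyDigits n = n % 10 :: pyDigits (n / 10) :=
        pyDigits_pos n (by omega)
      have e2 : pyDigits (n / 10) = n / 10 % 10 :: pyDigits (n / 100) := by
        rw [pyDigits_pos (n / 10) (by omega)]
        congr 2
        omega
      have e3 : pyDigits (n / 100) = n / 100 % 10 :: pyDigits (n / 100 / 10) :=
        pyDigits_pos (n / 100) (by omega)
      have ih : hoagieLoop (n / 10)
          = (List.zip (pyDigits (n / 10)) ((pyDigits (n / 10)).drop 2)).any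
              (fun p => p.1 == p.2) := by
        refine IH (n / 10).toNat ?_ (n / 10) (by omega) rfl
        omega
      rw [e2, e3] at ih
      simp only [List.drop_succ_cons, List.drop_zero] at ih
      rw [hoagieLoop_ge n hge, e1, e2, e3]
      simp only [List.drop_succ_cons, List.drop_zero, List.zip_cons_cons, List.any_cons]
      rw [ih]
      by_cases hac : n % 10 = n / 100 % 10
      · simp [hac]
      · simp [hac]
    · rw [hoagieLoop_lt n hge]
      have hlen : (pyDigits n).length ≤ 2 := pyDigits_len_le_two n h0 (by omega)
      rw [List.drop_eq_nil_of_le hlen, List.zip_nil_right]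
      rfl

theorem hoagieLoop_le_100 (n : Int) (h0 : 0 ≤ n) (h : n ≤ 100) : hoagieLoop n = false := by
  by_cases hge : n ≥ 100
  · have hn : n = 100 := by omega
    subst hn
    rw [hoagieLoop_ge 100 (by norm_num)]
    norm_num
    rw [hoagieLoop_lt]
    norm_num
  · exact hoagieLoop_lt n hge

-- ===== VERDICT (by name: the statement is the Claim_ definition above) =====
theorem has_hoagie_spec : Claim_equal_has_hoagie := by
  intro num _
  unfold Spec_has_hoagie has_hoagie has_hoagie_alt
  have habs : (if num < 0 then num * (-1) else num) = |num| := by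
    rcases lt_or_ge num 0 with h | h
    · rw [if_pos h, abs_of_neg h]; ring
    · rw [if_neg (not_lt.mpr h), abs_of_nonneg h]
  rw [habs]
  have h0 : (0:Int) ≤ |num| := abs_nonneg num
  by_cases hle : |num| ≤ 100
  · simp only [if_pos hle]
    rw [← hoagieLoop_eq_any _ h0, hoagieLoop_le_100 _ h0 hle]
  · simp only [if_neg hle]
    exact hoagieLoop_eq_any _ h0
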